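-- pv_equiv track=rewrite | github.com/kimeunh3/codingtest-study1 | haechan/4주차-2/짝지어제거하기.py | solution
-- ===== SOURCE A (Python) =====
-- def solution(s):
--     stack = []
--
--     for i in range(len(s)):
--         if not stack: # 스택이 비어있으면
--             stack.append(s[i]) # 스택에 직전 알파벳을 담는다
--         else:
--             if stack[-1] == s[i]: # 직전 알파벳과 현재 알파벳이 같다면
--                 stack.pop() # 직전 알파벳 삭제
--             else:
--                 stack.append(s[i]) # 같지 않으면 직전 알파벳 갱신
--
--     if not stack: return 1
--     else: return 0
-- ===== SOURCE B (Python) =====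
-- def _remove_first(cur):
--     # return cur with the first adjacent equal pair deleted, or None if no pair
--     for i in range(len(cur) - 1):
--         if cur[i] == cur[i + 1]:
--             return cur[:i] + cur[i + 2:]
--     return None
--
--
-- def solution(s):
--     cur = s
--     while True:
--         nxt = _remove_first(cur)
--         if nxt is None:
--             return 1 if cur == "" else 0
--         cur = nxt
-- ===== Notes on version B (the rewrite author's own statement) =====
-- stated objective: alternative
-- what changed: Replaces the single stack pass by repeated whole-string rescans that delete the first adjacent equal pair until no pair remains, then tests emptiness; correctness rests on the proved invariance of the stack result under removing one adjacent pair.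
import Mathlib
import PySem

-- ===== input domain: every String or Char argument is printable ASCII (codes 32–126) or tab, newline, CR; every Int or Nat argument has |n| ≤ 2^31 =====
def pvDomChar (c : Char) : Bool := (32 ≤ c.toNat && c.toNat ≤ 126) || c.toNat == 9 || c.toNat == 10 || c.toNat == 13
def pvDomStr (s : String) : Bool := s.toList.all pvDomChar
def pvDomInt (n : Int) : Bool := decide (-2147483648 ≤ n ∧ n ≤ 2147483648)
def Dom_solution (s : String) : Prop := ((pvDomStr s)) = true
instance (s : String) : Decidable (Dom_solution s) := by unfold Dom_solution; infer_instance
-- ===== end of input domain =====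

-- B replaces the one-pass stack by repeated remove-first-adjacent-pair rescans until a fixpoint (objective: alternative decomposition, not faster).

-- ===== PORT A =====
-- stack is modelled with its top at the HEAD of the list (append/[-1]/pop act on the top);
-- the emptiness test at the end is unaffected by this orientation.
def stackStep (st : List Char) (c : Char) : List Char :=
  match st with
  | [] => [c]                                  -- if not stack: stack.append(s[i])
  | t :: ts => if t = c then ts else c :: t :: ts  -- pop / append

def solution (s : String) : Int :=
  let stack := s.toList.foldl stackStep []     -- for i in range(len(s)): …
  if stack = [] then 1 else 0

-- ===== PORT B =====
-- _remove_first: scan for the first adjacent equal pair; some = removed, none = no pair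
def removeFirst? : List Char → Option (List Char)
  | a :: b :: rest => if a = b then some rest else (removeFirst? (b :: rest)).map (a :: ·)
  | _ => none

theorem removeFirst?_length : ∀ {l l' : List Char}, removeFirst? l = some l' →
    l'.length + 2 = l.length
  | [], _, h => by simp [removeFirst?] at h
  | [_], _, h => by simp [removeFirst?] at h
  | a :: b :: rest, l', h => by
    by_cases hab : a = b
    · simp [removeFirst?, hab] at h; subst h; simp
    · simp [removeFirst?, hab] at h
      obtain ⟨m, hm, rfl⟩ := h
      have := removeFirst?_length hm
      simp only [List.length_cons] at this ⊢; omega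

-- while True: cur = _remove_first(cur)  (loop until no pair remains)
def reduceAll (l : List Char) : List Char :=
  match h : removeFirst? l with
  | some l' => reduceAll l'
  | none => l
termination_by l.length
decreasing_by have := removeFirst?_length h; omega

def solution_alt (s : String) : Int :=
  if reduceAll s.toList = [] then 1 else 0     -- return 1 if cur == "" else 0

-- ===== PRECONDITION & SPEC =====
def Spec_solution (s : String) (out : Int) : Prop := out = solution_alt s
instance (s : String) (out : Int) : Decidable (Spec_solution s out) := by unfold Spec_solution; infer_instance

-- ===== CLAIM (what is proved, stated in full; the proofs are below) =====
def Claim_equal_solution : Prop := ∀ (s : String), Dom_solution s → Spec_solution s (solution s)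

-- ===== LEMMAS AND PROOFS =====

-- the stack never holds two equal adjacent elements
theorem stackStep_noadj {st : List Char} (c : Char) (h : List.IsChain (· ≠ ·) st) :
    List.IsChain (· ≠ ·) (stackStep st c) := by
  match st with
  | [] => simp [stackStep]
  | t :: ts =>
    by_cases htc : t = c
    · simp [stackStep, htc]
      exact h.tail
    · simpa [stackStep, htc, Ne.symm htc] using h

-- consuming an adjacent equal pair leaves a duplicate-free stack unchanged
theorem cancel_pair {st : List Char} (a : Char) (h : List.IsChain (· ≠ ·) st) :
    stackStep (stackStep st a) a = st := by
  match st with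
  | [] => simp [stackStep]
  | t :: ts =>
    by_cases hta : t = a
    · subst hta
      match ts with
      | [] => simp [stackStep]
      | u :: us =>
        have htu : t ≠ u := (List.isChain_cons_cons.mp h).1
        simp [stackStep, Ne.symm htu]
    · simp [stackStep, hta]

theorem cancel_mid {u v : List Char} (a : Char) {st : List Char}
    (h : List.IsChain (· ≠ ·) st) :
    (u ++ a :: a :: v).foldl stackStep st = (u ++ v).foldl stackStep st := by
  induction u generalizing st with
  | nil => simp [List.foldl, cancel_pair a h]
  | cons c u ih => simpa [List.foldl] using ih (stackStep_noadj c h)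

theorem removeFirst?_spec {l l' : List Char} (h : removeFirst? l = some l') :
    ∃ u a v, l = u ++ a :: a :: v ∧ l' = u ++ v := by
  induction l generalizing l' with
  | nil => simp [removeFirst?] at h
  | cons a t ih =>
    match t with
    | [] => simp [removeFirst?] at h
    | b :: rest =>
      by_cases hab : a = b
      · simp [removeFirst?, hab] at h
        exact ⟨[], b, rest, by simp [hab, ← h], by simp [← h]⟩
      · simp [removeFirst?, hab] at h
        obtain ⟨m, hm, rfl⟩ := h
        obtain ⟨u, x, v, hl, hm'⟩ := ih hm
        exact ⟨a :: u, x, v, by simp [hl], by simp [hm']⟩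

theorem removeFirst?_none_chain {l : List Char} (h : removeFirst? l = none) :
    List.IsChain (· ≠ ·) l := by
  match l with
  | [] => simp
  | [a] => simp
  | a :: b :: rest =>
    by_cases hab : a = b
    · simp [removeFirst?, hab] at h
    · simp [removeFirst?, hab] at h
      exact List.isChain_cons_cons.mpr ⟨hab, removeFirst?_none_chain h⟩

-- a duplicate-free string just piles up on the stack
theorem foldl_chain_rev {l : List Char} {c : Char} {st : List Char}
    (h : List.IsChain (· ≠ ·) (c :: l)) :
    l.foldl stackStep (c :: st) = l.reverse ++ c :: st := by
  induction l generalizing c st with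
  | nil => simp
  | cons d l ih =>
    have hcd : c ≠ d := (List.isChain_cons_cons.mp h).1
    have : stackStep (c :: st) d = d :: c :: st := by simp [stackStep, hcd]
    simp only [List.foldl, this]
    rw [ih (List.isChain_cons_cons.mp h).2]
    simp

theorem foldl_empty_iff {l : List Char} (h : List.IsChain (· ≠ ·) l) :
    (l.foldl stackStep [] = [] ↔ l = []) := by
  match l with
  | [] => simp
  | c :: l =>
    constructor
    · intro he
      have : l.foldl stackStep [c] = l.reverse ++ [c] := foldl_chain_rev h
      simp only [List.foldl, stackStep] at he
      rw [this] at he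
      simp at he
    · intro h'; simp at h'

-- removing one adjacent pair does not change the final stack
theorem reduce_foldl_aux : ∀ (n : Nat) (l : List Char), l.length ≤ n →
    l.foldl stackStep [] = (reduceAll l).foldl stackStep [] := by
  intro n
  induction n with
  | zero =>
    intro l hl
    have hnil : l = [] := by cases l <;> simp_all
    subst hnil
    rw [reduceAll]
    split
    · next h => simp [removeFirst?] at h
    · rfl
  | succ n ih =>
    intro l hl
    rw [reduceAll]
    split
    · next l' h =>
      have hlen := removeFirst?_length h
      obtain ⟨u, a, v, hu, hv⟩ := removeFirst?_spec h
      subst hu; subst hv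
      rw [cancel_mid a (by simp)]
      exact ih (u ++ v) (by simp only [List.length_append, List.length_cons] at hlen hl ⊢; omega)
    · rfl

theorem reduce_foldl (l : List Char) :
    l.foldl stackStep [] = (reduceAll l).foldl stackStep [] :=
  reduce_foldl_aux l.length l (le_refl _)

theorem reduceAll_none_aux : ∀ (n : Nat) (l : List Char), l.length ≤ n →
    removeFirst? (reduceAll l) = none := by
  intro n
  induction n with
  | zero =>
    intro l hl
    have hnil : l = [] := by cases l <;> simp_all
    subst hnil
    rw [reduceAll]
    split
    · next h => simp [removeFirst?] at h
    · assumption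
  | succ n ih =>
    intro l hl
    rw [reduceAll]
    split
    · next l' h =>
      have hlen := removeFirst?_length h
      exact ih l' (by omega)
    · assumption

theorem reduceAll_none (l : List Char) : removeFirst? (reduceAll l) = none :=
  reduceAll_none_aux l.length l (le_refl _)

-- ===== VERDICT (by name: the statement is the Claim_ definition above) =====
theorem solution_spec : Claim_equal_solution := by
  intro s _
  unfold Spec_solution solution solution_alt
  have hchain := removeFirst?_none_chain (reduceAll_none s.toList)
  have h1 := reduce_foldl s.toList
  have h2 := foldl_empty_iff hchain
  by_cases he : reduceAll s.toList = []
  · simp [he, h1]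
  · have : s.toList.foldl stackStep [] ≠ [] := by
      rw [h1]; exact fun hc => he (h2.mp hc)
    simp [he, this]
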